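-- pv_equiv track=rewrite | github.com/ye-kyaw-thu/tools | python/prefix_suffix_extract.py | extract_prefixes_suffixes
-- ===== SOURCE A (Python) =====
-- def extract_prefixes_suffixes(dictionary, corpus, freq, delimiter, verbose):
--     prefixes, suffixes = {}, {}
--
--     for line in corpus:
--         words = line.split()
--         for word in words:
--             for dict_word in dictionary:
--                 # Check for prefixes
--                 if word.startswith(dict_word):
--                     suffix = word[len(dict_word):]
--                     if suffix:
--                         if verbose:
--                             combination = f'{dict_word}+{suffix}'
--                         else:
--                             combination = dict_word
--                         if combination not in prefixes:
--                             prefixes[combination] = 0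
--                         prefixes[combination] += 1
--
--                 # Check for suffixes
--                 if word.endswith(dict_word):
--                     prefix = word[:-len(dict_word)]
--                     if prefix:
--                         if verbose:
--                             combination = f'{prefix}+{dict_word}'
--                         else:
--                             combination = dict_word
--                         if combination not in suffixes:
--                             suffixes[combination] = 0
--                         suffixes[combination] += 1
--
--     filtered_prefixes = {k: v for k, v in prefixes.items() if v >= freq}
--     filtered_suffixes = {k: v for k, v in suffixes.items() if v >= freq}
--
--     return filtered_prefixes, filtered_suffixes
-- ===== SOURCE B (Python) =====
-- def extract_prefixes_suffixes(dictionary, corpus, freq, delimiter, verbose):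
--     # Index the dictionary once: word -> list of its positions (dictionary may
--     # repeat entries; each occurrence counts once, as in a plain scan).
--     positions = {}
--     for i, dict_word in enumerate(dictionary):
--         if dict_word not in positions:
--             positions[dict_word] = []
--         positions[dict_word].append(i)
--
--     prefixes, suffixes = {}, {}
--     for line in corpus:
--         for word in line.split():
--             n = len(word)
--             # Enumerate the word's own proper prefixes / suffixes and look each
--             # up in the index, instead of scanning the whole dictionary.
--             pmatches = []
--             for k in range(n):
--                 p = word[:k]
--                 if p in positions:
--                     for i in positions[p]:
--                         pmatches.append((i, p))
--             smatches = []
--             for k in range(1, n):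
--                 s = word[k:]
--                 if s in positions:
--                     for i in positions[s]:
--                         smatches.append((i, s))
--             for _, p in sorted(pmatches, key=lambda t: t[0]):
--                 key = f'{p}+{word[len(p):]}' if verbose else p
--                 if key not in prefixes:
--                     prefixes[key] = 0
--                 prefixes[key] += 1
--             for _, s in sorted(smatches, key=lambda t: t[0]):
--                 key = f'{word[:-len(s)]}+{s}' if verbose else s
--                 if key not in suffixes:
--                     suffixes[key] = 0
--                 suffixes[key] += 1
--
--     filtered_prefixes = {k: v for k, v in prefixes.items() if v >= freq}
--     filtered_suffixes = {k: v for k, v in suffixes.items() if v >= freq}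
--     return filtered_prefixes, filtered_suffixes
-- ===== Notes on version B (the rewrite author's own statement) =====
-- stated objective: faster
-- what changed: Instead of scanning the whole dictionary for every corpus word, B builds a hash index of the dictionary once and, for each word, enumerates the word's own proper prefixes/suffixes and looks each up in the index (sorting the few hits by dictionary position to keep the exact insertion order), so per-word cost depends on word length, not dictionary size.
import Mathlib
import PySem

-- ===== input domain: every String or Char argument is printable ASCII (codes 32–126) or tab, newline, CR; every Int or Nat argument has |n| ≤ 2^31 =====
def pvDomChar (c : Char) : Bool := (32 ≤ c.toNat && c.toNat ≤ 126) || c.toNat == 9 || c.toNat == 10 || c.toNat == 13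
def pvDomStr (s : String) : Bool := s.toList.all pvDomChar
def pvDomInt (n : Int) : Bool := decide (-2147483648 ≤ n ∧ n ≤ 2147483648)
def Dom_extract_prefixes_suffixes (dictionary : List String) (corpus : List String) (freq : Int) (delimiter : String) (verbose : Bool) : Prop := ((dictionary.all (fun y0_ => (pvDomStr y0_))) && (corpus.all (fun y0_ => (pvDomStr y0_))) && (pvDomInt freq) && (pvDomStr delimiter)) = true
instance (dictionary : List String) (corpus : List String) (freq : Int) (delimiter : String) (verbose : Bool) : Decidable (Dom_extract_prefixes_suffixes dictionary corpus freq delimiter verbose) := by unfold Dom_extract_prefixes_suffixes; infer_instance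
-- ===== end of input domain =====

-- B replaces A's per-word scan of the whole dictionary by a dictionary hash index
-- looked up at each proper prefix/suffix of the word (objective: faster).

-- ===== PORT A =====
-- shared idiom of both Pythons: "if k not in d: d[k] = 0; d[k] += 1"
def pvBump (d : PySem.Dict String Int) (k : String) : PySem.Dict String Int :=
  let d1 := if d.contains k then d else d.insert k 0
  d1.insert k (d1.getD k 0 + 1)

-- the body of A's "for dict_word in dictionary" loop, one corpus word at a time
def pvAWord (dictionary : List String) (verbose : Bool)
    (PS : PySem.Dict String Int × PySem.Dict String Int) (word : String) :
    PySem.Dict String Int × PySem.Dict String Int :=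
  dictionary.foldl (fun PS dict_word =>
    let P :=
      if PySem.Str.startswith word dict_word then
        let suffix := PySem.Str.slice word (some (PySem.Str.len dict_word)) none
        if suffix ≠ "" then
          pvBump PS.1 (if verbose then dict_word ++ "+" ++ suffix else dict_word)
        else PS.1
      else PS.1
    let S :=
      if PySem.Str.endswith word dict_word then
        let prefix_ := PySem.Str.slice word none (some (-(PySem.Str.len dict_word)))
        if prefix_ ≠ "" then
          pvBump PS.2 (if verbose then prefix_ ++ "+" ++ dict_word else dict_word)
        else PS.2
      else PS.2
    (P, S)) PS

def extract_prefixes_suffixes (dictionary : List String) (corpus : List String) (freq : Int) (delimiter : String) (verbose : Bool) : (List (String × Int)) × (List (String × Int)) :=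
  let PS := corpus.foldl (fun PS line =>
      (PySem.Str.split₀ line).foldl (pvAWord dictionary verbose) PS)
    (PySem.Dict.empty, PySem.Dict.empty)
  -- the two final dict comprehensions keep exactly the items with v >= freq
  (PS.1.items.filter (fun kv => freq ≤ kv.2), PS.2.items.filter (fun kv => freq ≤ kv.2))

-- ===== PORT B =====
-- positions[w] = list of indices of w in the dictionary ("for i, w in enumerate(dictionary)")
def pvIndex (dictionary : List String) : PySem.Dict String (List Int) :=
  (PySem.List.enumerate dictionary).foldl (fun pos e =>
    let pos1 := if pos.contains e.2 then pos else pos.insert e.2 []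
    pos1.insert e.2 (pos1.getD e.2 [] ++ [e.1])) PySem.Dict.empty

-- B's per-word work: enumerate the word's proper prefixes/suffixes, look each up
-- in the index, sort the hits by dictionary position, then count them
def pvBWord (pos : PySem.Dict String (List Int)) (verbose : Bool)
    (PS : PySem.Dict String Int × PySem.Dict String Int) (word : String) :
    PySem.Dict String Int × PySem.Dict String Int :=
  let n := PySem.Str.len word
  let pmatches := (PySem.List.pyRange 0 n).foldl (fun acc k =>
      let p := PySem.Str.slice word none (some k)
      match pos.get? p with
      | some is => acc ++ is.map (fun i => (i, p))
      | none => acc) []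
  let smatches := (PySem.List.pyRange 1 n).foldl (fun acc k =>
      let s := PySem.Str.slice word (some k) none
      match pos.get? s with
      | some is => acc ++ is.map (fun i => (i, s))
      | none => acc) []
  let P := (PySem.List.sorted pmatches (fun t => t.1)).foldl (fun P t =>
      pvBump P (if verbose then t.2 ++ "+" ++ PySem.Str.slice word (some (PySem.Str.len t.2)) none else t.2)) PS.1
  let S := (PySem.List.sorted smatches (fun t => t.1)).foldl (fun S t =>
      pvBump S (if verbose then PySem.Str.slice word none (some (-(PySem.Str.len t.2))) ++ "+" ++ t.2 else t.2)) PS.2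
  (P, S)

def extract_prefixes_suffixes_alt (dictionary : List String) (corpus : List String) (freq : Int) (delimiter : String) (verbose : Bool) : (List (String × Int)) × (List (String × Int)) :=
  let pos := pvIndex dictionary
  let PS := corpus.foldl (fun PS line =>
      (PySem.Str.split₀ line).foldl (pvBWord pos verbose) PS)
    (PySem.Dict.empty, PySem.Dict.empty)
  (PS.1.items.filter (fun kv => freq ≤ kv.2), PS.2.items.filter (fun kv => freq ≤ kv.2))

-- ===== PRECONDITION & SPEC =====
def Spec_extract_prefixes_suffixes (dictionary : List String) (corpus : List String) (freq : Int) (delimiter : String) (verbose : Bool) (out : (List (String × Int)) × (List (String × Int))) : Prop := out = extract_prefixes_suffixes_alt dictionary corpus freq delimiter verbose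
instance (dictionary : List String) (corpus : List String) (freq : Int) (delimiter : String) (verbose : Bool) (out : (List (String × Int)) × (List (String × Int))) : Decidable (Spec_extract_prefixes_suffixes dictionary corpus freq delimiter verbose out) := by unfold Spec_extract_prefixes_suffixes; infer_instance

-- ===== CLAIM (what is proved, stated in full; the proofs are below) =====
def Claim_equal_extract_prefixes_suffixes : Prop := ∀ (dictionary : List String) (corpus : List String) (freq : Int) (delimiter : String) (verbose : Bool), Dom_extract_prefixes_suffixes dictionary corpus freq delimiter verbose → Spec_extract_prefixes_suffixes dictionary corpus freq delimiter verbose (extract_prefixes_suffixes dictionary corpus freq delimiter verbose)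

-- ===== LEMMAS AND PROOFS =====

-- A's per-word loop, split into its two independent guarded folds.
def pvCP (word dw : String) : Bool :=
  PySem.Str.startswith word dw && decide (PySem.Str.slice word (some (PySem.Str.len dw)) none ≠ "")
def pvCS (word dw : String) : Bool :=
  PySem.Str.endswith word dw && decide (PySem.Str.slice word none (some (-(PySem.Str.len dw))) ≠ "")
def pvKeyP (word : String) (verbose : Bool) (dw : String) : String :=
  if verbose then dw ++ "+" ++ PySem.Str.slice word (some (PySem.Str.len dw)) none else dw
def pvKeyS (word : String) (verbose : Bool) (dw : String) : String :=
  if verbose then PySem.Str.slice word none (some (-(PySem.Str.len dw))) ++ "+" ++ dw else dw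

theorem pvAWord_eq_filter (dictionary : List String) (verbose : Bool)
    (PS : PySem.Dict String Int × PySem.Dict String Int) (word : String) :
    pvAWord dictionary verbose PS word =
      ((dictionary.filter (pvCP word)).foldl (fun P dw => pvBump P (pvKeyP word verbose dw)) PS.1,
       (dictionary.filter (pvCS word)).foldl (fun S dw => pvBump S (pvKeyS word verbose dw)) PS.2) := by
  obtain ⟨P0, S0⟩ := PS
  unfold pvAWord
  induction dictionary generalizing P0 S0 with
  | nil => rfl
  | cons dw l ih =>
    simp only [List.foldl_cons, List.filter_cons]
    have hP : (if PySem.Str.startswith word dw then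
          let suffix := PySem.Str.slice word (some (PySem.Str.len dw)) none
          if suffix ≠ "" then
            pvBump P0 (if verbose then dw ++ "+" ++ suffix else dw)
          else P0
        else P0) = (if pvCP word dw then pvBump P0 (pvKeyP word verbose dw) else P0) := by
      by_cases h1 : PySem.Str.startswith word dw = true <;>
        by_cases h2 : PySem.Str.slice word (some (PySem.Str.len dw)) none ≠ "" <;>
        simp only [h1, if_true, if_false, Bool.false_eq_true, pvCP, pvKeyP, Bool.true_and, Bool.false_and, ne_eq, h2, not_false_eq_true, not_true_eq_false, decide_true, decide_false] <;> simp [h2]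
    have hS : (if PySem.Str.endswith word dw then
          let prefix_ := PySem.Str.slice word none (some (-(PySem.Str.len dw)))
          if prefix_ ≠ "" then
            pvBump S0 (if verbose then prefix_ ++ "+" ++ dw else dw)
          else S0
        else S0) = (if pvCS word dw then pvBump S0 (pvKeyS word verbose dw) else S0) := by
      by_cases h1 : PySem.Str.endswith word dw = true <;>
        by_cases h2 : PySem.Str.slice word none (some (-(PySem.Str.len dw))) ≠ "" <;>
        simp only [h1, if_true, if_false, Bool.false_eq_true, pvCS, pvKeyS, Bool.true_and, Bool.false_and, ne_eq, h2, not_false_eq_true, not_true_eq_false, decide_true, decide_false] <;> simp [h2]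
    rw [hP, hS, ih]
    by_cases h1 : pvCP word dw = true <;> by_cases h2 : pvCS word dw = true <;>
      simp [h1, h2]

-- the index really is "positions of p in the dictionary"
theorem pvIndex_getD (l : List String) (p : String) :
    (pvIndex l).getD p [] = ((PySem.List.enumerate l).filter (fun e => e.2 == p)).map (fun e => e.1) := by
  induction l using List.reverseRecOn with
  | nil => simp [pvIndex, PySem.List.enumerate_nil, PySem.Dict.getD_empty]
  | append_singleton l x ih =>
    have hfold : pvIndex (l ++ [x]) =
        (let d := pvIndex l
         let d1 := if d.contains x then d else d.insert x []
         d1.insert x (d1.getD x [] ++ [(l.length : Int)])) := by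
      unfold pvIndex
      rw [PySem.List.enumerate_append, List.foldl_append]
      simp [PySem.List.enumerate_cons, PySem.List.enumerate_nil]
    have habsent : (pvIndex l).contains x = false → (pvIndex l).getD x [] = [] := by
      intro hc
      have := PySem.Dict.contains_eq_isSome_get? (pvIndex l) x
      rw [hc] at this
      have hnone : (pvIndex l).get? x = none := by
        cases hg : (pvIndex l).get? x
        · rfl
        · rw [hg] at this; simp at this
      show ((pvIndex l).get? x).getD [] = []
      rw [hnone]; rfl
    have hstep : (pvIndex (l ++ [x])).getD p [] =
        (if p = x then (pvIndex l).getD p [] ++ [(l.length : Int)] else (pvIndex l).getD p []) := by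
      rw [hfold]
      by_cases hc : (pvIndex l).contains x = true
      · simp only [hc, if_true]
        rw [PySem.Dict.getD_insert]
        by_cases hp : p = x <;> simp [hp]
      · simp only [Bool.not_eq_true] at hc
        simp only [hc, Bool.false_eq_true, if_false]
        rw [PySem.Dict.getD_insert, PySem.Dict.getD_insert]
        by_cases hp : p = x
        · simp [hp, habsent hc]
        · simp [hp, PySem.Dict.getD_insert]
    rw [hstep, PySem.List.enumerate_append]
    simp only [List.filter_append, List.map_append, ih, PySem.List.enumerate_cons,
      PySem.List.enumerate_nil]
    by_cases hp : p = x
    · simp [hp, List.filter_cons]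
    · simp [List.filter_cons, hp, Ne.symm hp]

-- re-pairing the positions of p with p gives back the filtered enumeration
theorem pv_group_repair (xs : List (Int × String)) (p : String) :
    (((xs.filter (fun e => e.2 == p)).map (fun e => e.1)).map (fun i => (i, p))) = xs.filter (fun e => e.2 == p) := by
  induction xs with
  | nil => rfl
  | cons e xs ih =>
    obtain ⟨i, w⟩ := e
    by_cases h : w = p
    · subst h; simp [List.filter_cons, ih]
    · simp [List.filter_cons, h, ih]

-- a filter by a disjunction of disjoint tests splits into two filters
theorem pv_filter_or_perm {α : Type} (p q : α → Bool) (xs : List α)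
    (h : ∀ a ∈ xs, ¬(p a = true ∧ q a = true)) :
    (xs.filter (fun a => p a || q a)).Perm (xs.filter p ++ xs.filter q) := by
  induction xs with
  | nil => simp
  | cons a xs ih =>
    have ih' := ih (fun b hb => h b (List.mem_cons_of_mem a hb))
    cases hp : p a with
    | true =>
      have hq : q a = false := by
        cases hqt : q a
        · rfl
        · exact absurd ⟨hp, hqt⟩ (h a (List.mem_cons_self))
      simpa [List.filter_cons, hp, hq] using ih'.cons a
    | false =>
      cases hq : q a with
      | true =>
        have : (a :: xs.filter (fun b => p b || q b)).Perm
            (a :: (xs.filter p ++ xs.filter q)) := ih'.cons a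
        simpa [List.filter_cons, hp, hq] using this.trans List.perm_middle.symm
      | false => simpa [List.filter_cons, hp, hq] using ih' 

-- grouping by a nodup key list is a permutation of one filter
theorem pv_flatMap_groups_perm (ks : List String) (hnd : ks.Nodup) (xs : List (Int × String)) :
    (ks.flatMap (fun p => xs.filter (fun e => e.2 == p))).Perm
      (xs.filter (fun e => decide (e.2 ∈ ks))) := by
  induction ks with
  | nil => simp
  | cons p ks ih =>
    obtain ⟨hp, hnd'⟩ := List.nodup_cons.mp hnd
    have hsplit := pv_filter_or_perm (fun e => e.2 == p) (fun e => decide (e.2 ∈ ks)) xs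
      (by
        rintro e - ⟨h1, h2⟩
        exact hp (by simpa using (beq_iff_eq.mp h1 ▸ of_decide_eq_true h2)))
    have hcong : xs.filter (fun e => decide (e.2 ∈ p :: ks)) =
        xs.filter (fun e => (e.2 == p) || decide (e.2 ∈ ks)) := by
      refine List.filter_congr (fun e _ => ?_)
      simp only [List.mem_cons, decide_eq_true_eq]
      by_cases h1 : e.2 = p <;> by_cases h2 : e.2 ∈ ks <;> simp [h1, h2]
    rw [List.flatMap_cons, hcong]
    exact (((ih hnd').append_left (xs.filter (fun e => e.2 == p)))).trans hsplit.symm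

-- the candidate lists B enumerates
def pvKsP (word : String) : List String :=
  (PySem.List.pyRange 0 (PySem.Str.len word)).map (fun k => PySem.Str.slice word none (some k))
def pvKsS (word : String) : List String :=
  (PySem.List.pyRange 1 (PySem.Str.len word)).map (fun k => PySem.Str.slice word (some k) none)

theorem pv_toList_slice_from (word : String) (m : Nat) :
    (PySem.Str.slice word (some (m : Int)) none).toList = word.toList.drop m := by
  rw [PySem.Str.toList_slice]; exact PySem.List.slice_from_natCast _ m

theorem pv_toList_slice_to (word : String) {k : Int} (hk : 0 ≤ k) :
    (PySem.Str.slice word none (some k)).toList = word.toList.take k.toNat := by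
  rw [PySem.Str.toList_slice]; exact PySem.List.slice_to _ hk

theorem pvCP_eq_mem (word dw : String) : pvCP word dw = decide (dw ∈ pvKsP word) := by
  have hiff : pvCP word dw = true ↔
      (dw.toList <+: word.toList ∧ dw.toList.length < word.toList.length) := by
    unfold pvCP
    rw [Bool.and_eq_true, decide_eq_true_eq, PySem.Str.startswith_eq, PySem.Chars.startswith_iff]
    have h2 : PySem.Str.slice word (some (PySem.Str.len dw)) none ≠ "" ↔
        dw.toList.length < word.toList.length := by
      rw [PySem.Str.len_eq]
      rw [ne_eq, ← String.toList_eq_nil_iff, pv_toList_slice_from, List.drop_eq_nil_iff]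
      omega
    rw [h2]
  have hmem : dw ∈ pvKsP word ↔
      (dw.toList <+: word.toList ∧ dw.toList.length < word.toList.length) := by
    unfold pvKsP
    rw [List.mem_map]
    constructor
    · rintro ⟨k, hk, rfl⟩
      rw [PySem.List.mem_pyRange_one, PySem.Str.len_eq] at hk
      obtain ⟨hk0, hkn⟩ := hk
      have htl := pv_toList_slice_to word hk0
      constructor
      · rw [htl]; exact List.take_prefix _ _
      · rw [htl, List.length_take]; omega
    · rintro ⟨hpre, hlen⟩
      refine ⟨(dw.toList.length : Int), ?_, ?_⟩
      · rw [PySem.List.mem_pyRange_one, PySem.Str.len_eq]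
        constructor
        · positivity
        · exact_mod_cast hlen
      · apply String.toList_inj.mp
        rw [pv_toList_slice_to word (by positivity), Int.toNat_natCast]
        exact (List.prefix_iff_eq_take.mp hpre).symm
  rw [Bool.eq_iff_iff, decide_eq_true_eq, hiff, hmem]
theorem pvCS_eq_mem (word dw : String) : pvCS word dw = decide (dw ∈ pvKsS word) := by
  have hmem : dw ∈ pvKsS word ↔
      (dw.toList <:+ word.toList ∧ 0 < dw.toList.length ∧ dw.toList.length < word.toList.length) := by
    unfold pvKsS
    rw [List.mem_map]
    constructor
    · rintro ⟨k, hk, rfl⟩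
      rw [PySem.List.mem_pyRange_one, PySem.Str.len_eq] at hk
      obtain ⟨hk1, hkn⟩ := hk
      have htl := pv_toList_slice_from word k.toNat
      rw [show ((k.toNat : Int)) = k by omega] at htl
      refine ⟨?_, ?_, ?_⟩
      · rw [htl]; exact List.drop_suffix _ _
      · rw [htl, List.length_drop]; omega
      · rw [htl, List.length_drop]; omega
    · rintro ⟨hsuf, hpos, hlen⟩
      refine ⟨((word.toList.length - dw.toList.length : Nat) : Int), ?_, ?_⟩
      · rw [PySem.List.mem_pyRange_one, PySem.Str.len_eq]; omega
      · apply String.toList_inj.mp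
        rw [pv_toList_slice_from]
        exact (List.suffix_iff_eq_drop.mp hsuf).symm
  have hiff : pvCS word dw = true ↔
      (dw.toList <:+ word.toList ∧ 0 < dw.toList.length ∧ dw.toList.length < word.toList.length) := by
    unfold pvCS
    rw [Bool.and_eq_true, decide_eq_true_eq, PySem.Str.endswith_eq, PySem.Chars.endswith_iff]
    rcases Nat.eq_zero_or_pos dw.toList.length with hm | hm
    · have h2 : PySem.Str.slice word none (some (0 : Int)) = "" := by
        rw [← String.toList_eq_nil_iff, pv_toList_slice_to word le_rfl]
        simp
      have h2' : PySem.Str.slice word none (some (-(PySem.Str.len dw))) = "" := by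
        rw [show (-(PySem.Str.len dw)) = (0 : Int) by rw [PySem.Str.len_eq, hm]; omega]
        exact h2
      simp [h2, h2', hm]
    · have h2 : (PySem.Str.slice word none (some (-(PySem.Str.len dw)))).toList =
          word.toList.take (word.toList.length - dw.toList.length) := by
        rw [PySem.Str.len_eq, PySem.Str.toList_slice]
        exact PySem.List.slice_to_neg_natCast _ _ hm
      rw [ne_eq, ← String.toList_eq_nil_iff, h2, List.take_eq_nil_iff]
      constructor
      · rintro ⟨hsuf, hne⟩
        have hwne : word.toList ≠ [] := by
          intro h0; exact hne (Or.inr h0)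
        have : word.toList.length - dw.toList.length ≠ 0 := fun h0 => hne (Or.inl h0)
        exact ⟨hsuf, hm, by omega⟩
      · rintro ⟨hsuf, -, hlt⟩
        refine ⟨hsuf, ?_⟩
        rintro (h0 | h0)
        · omega
        · rw [h0] at hlt; simp at hlt
  rw [Bool.eq_iff_iff, decide_eq_true_eq, hiff, hmem]
theorem pvKsP_nodup (word : String) : (pvKsP word).Nodup := by
  unfold pvKsP
  refine List.Nodup.map_on ?_ (PySem.List.nodup_pyRange_one _ _)
  intro x hx y hy hf
  rw [PySem.List.mem_pyRange_one, PySem.Str.len_eq] at hx hy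
  have hlx : (PySem.Str.slice word none (some x)).toList.length = x.toNat := by
    rw [pv_toList_slice_to word hx.1, List.length_take]; omega
  have hly : (PySem.Str.slice word none (some y)).toList.length = y.toNat := by
    rw [pv_toList_slice_to word hy.1, List.length_take]; omega
  rw [hf] at hlx
  omega
theorem pvKsS_nodup (word : String) : (pvKsS word).Nodup := by
  unfold pvKsS
  refine List.Nodup.map_on ?_ (PySem.List.nodup_pyRange_one _ _)
  intro x hx y hy hf
  rw [PySem.List.mem_pyRange_one, PySem.Str.len_eq] at hx hy
  have htx := pv_toList_slice_from word x.toNat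
  have hty := pv_toList_slice_from word y.toNat
  rw [show ((x.toNat : Int)) = x by omega] at htx
  rw [show ((y.toNat : Int)) = y by omega] at hty
  have hlx : (PySem.Str.slice word (some x) none).toList.length = word.toList.length - x.toNat := by
    rw [htx, List.length_drop]
  have hly : (PySem.Str.slice word (some y) none).toList.length = word.toList.length - y.toNat := by
    rw [hty, List.length_drop]
  rw [hf] at hlx
  omega

-- the second components of the filtered enumeration are the filtered list
theorem pv_map_snd_filter_enumerate (q : String → Bool) (l : List String) :
    (((PySem.List.enumerate l).filter (fun e => q e.2)).map (fun e => e.2)) = l.filter q := by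
  suffices h : ∀ (s : Int), (((PySem.List.enumerate l s).filter (fun e => q e.2)).map (fun e => e.2)) = l.filter q from h 0
  induction l with
  | nil => intro s; rfl
  | cons a l ih =>
    intro s
    rw [PySem.List.enumerate_cons]
    by_cases h : q a <;> simp [List.filter_cons, h, ih (s + 1)]

-- a lookup-and-append loop is a flatMap over the looked-up groups
theorem pv_collect_flatMap (d : PySem.Dict String (List Int)) (ks : List Int) (f : Int → String) :
    ks.foldl (fun acc k =>
      match d.get? (f k) with
      | some is => acc ++ is.map (fun i => (i, f k))
      | none => acc) [] =
    (ks.map f).flatMap (fun p => (d.getD p []).map (fun i => (i, p))) := by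
  suffices h : ∀ acc : List (Int × String), ks.foldl (fun acc k =>
      match d.get? (f k) with
      | some is => acc ++ is.map (fun i => (i, f k))
      | none => acc) acc =
      acc ++ (ks.map f).flatMap (fun p => (d.getD p []).map (fun i => (i, p))) by
    simpa using h []
  induction ks with
  | nil => intro acc; simp
  | cons k ks ih =>
    intro acc
    have hgd : d.getD (f k) [] = (d.get? (f k)).getD [] := rfl
    cases hg : d.get? (f k) with
    | some is => simp [List.foldl_cons, hg, ih, hgd]
    | none => simp [List.foldl_cons, hg, ih, hgd]

-- one side of B's per-word work equals the corresponding filtered enumeration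
theorem pv_side (dictionary : List String) (ks : List Int) (f : Int → String) (c : String → Bool)
    (hc : ∀ dw, c dw = decide (dw ∈ ks.map f)) (hnd : (ks.map f).Nodup) :
    PySem.List.sorted (ks.foldl (fun acc k =>
        match (pvIndex dictionary).get? (f k) with
        | some is => acc ++ is.map (fun i => (i, f k))
        | none => acc) []) (fun t => t.1)
      = (PySem.List.enumerate dictionary).filter (fun e => c e.2) := by
  rw [pv_collect_flatMap]
  have hgroups : (ks.map f).flatMap (fun p => ((pvIndex dictionary).getD p []).map (fun i => (i, p)))
      = (ks.map f).flatMap (fun p => (PySem.List.enumerate dictionary).filter (fun e => e.2 == p)) := by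
    simp only [pvIndex_getD, pv_group_repair]
  rw [hgroups]
  apply PySem.List.sorted_eq_of_perm_of_pairwise_lt
  · have h2 : (PySem.List.enumerate dictionary).filter (fun e => c e.2)
        = (PySem.List.enumerate dictionary).filter (fun e => decide (e.2 ∈ ks.map f)) :=
      List.filter_congr (fun e _ => hc e.2)
    rw [h2]
    exact (pv_flatMap_groups_perm (ks.map f) hnd (PySem.List.enumerate dictionary)).symm
  · exact List.Pairwise.sublist List.filter_sublist (PySem.List.pairwise_lt_enumerate _ _)

-- B's per-word function equals A's
theorem pvBWord_eq (dictionary : List String) (verbose : Bool)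
    (PS : PySem.Dict String Int × PySem.Dict String Int) (word : String) :
    pvBWord (pvIndex dictionary) verbose PS word = pvAWord dictionary verbose PS word := by
  rw [pvAWord_eq_filter]
  unfold pvBWord
  dsimp only
  rw [pv_side dictionary (PySem.List.pyRange 0 (PySem.Str.len word))
        (fun k => PySem.Str.slice word none (some k)) (pvCP word)
        (pvCP_eq_mem word) (pvKsP_nodup word),
      pv_side dictionary (PySem.List.pyRange 1 (PySem.Str.len word))
        (fun k => PySem.Str.slice word (some k) none) (pvCS word)
        (pvCS_eq_mem word) (pvKsS_nodup word),
      ← pv_map_snd_filter_enumerate (pvCP word) dictionary,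
      ← pv_map_snd_filter_enumerate (pvCS word) dictionary,
      List.foldl_map, List.foldl_map]
  rfl

-- ===== VERDICT (by name: the statement is the Claim_ definition above) =====
theorem extract_prefixes_suffixes_spec : Claim_equal_extract_prefixes_suffixes := by
  intro dictionary corpus freq delimiter verbose _
  unfold Spec_extract_prefixes_suffixes extract_prefixes_suffixes extract_prefixes_suffixes_alt
  have h : pvBWord (pvIndex dictionary) verbose = pvAWord dictionary verbose := by
    funext PS word; exact pvBWord_eq dictionary verbose PS word
  simp only [h]
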